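-- pv_equiv track=rewrite | github.com/davidrmclellan18/minesweeper_game | minesweeper.py | victory_condition
-- ===== SOURCE A (Python) =====
-- def victory_condition(board):
--     total_clear = 1
--     for i in range(len(board)):
--         if 'X' in board[i]:
--             return 2
--         if 'E' in board[i]:
--             total_clear = 0
--     return total_clear
-- ===== SOURCE B (Python) =====
-- def victory_condition(board):
--     if any('X' in row for row in board):
--         return 2
--     if any('E' in row for row in board):
--         return 0
--     return 1
-- ===== Notes on version B (the rewrite author's own statement) =====
-- stated objective: simpler
-- what changed: Replaces the single fused loop with an early-return and a mutable flag by two independent priority-ordered membership passes (any 'X', then any 'E'), with no accumulator.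
import Mathlib
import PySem

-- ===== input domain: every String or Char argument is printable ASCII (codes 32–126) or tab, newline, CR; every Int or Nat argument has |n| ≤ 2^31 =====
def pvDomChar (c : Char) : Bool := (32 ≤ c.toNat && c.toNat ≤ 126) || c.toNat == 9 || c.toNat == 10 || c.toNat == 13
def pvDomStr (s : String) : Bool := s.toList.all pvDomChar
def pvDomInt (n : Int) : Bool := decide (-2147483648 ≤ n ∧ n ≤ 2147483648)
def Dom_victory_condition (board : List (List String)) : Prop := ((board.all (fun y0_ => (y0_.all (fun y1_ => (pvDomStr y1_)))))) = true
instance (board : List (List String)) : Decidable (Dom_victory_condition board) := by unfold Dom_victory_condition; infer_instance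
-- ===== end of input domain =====

-- B is a simpler decomposition: two priority-ordered membership passes instead of one fused loop with a flag.

-- ===== PORT A =====
-- loop over rows carrying total_clear; early return 2 on a row containing "X"
def victory_condition_loop (rows : List (List String)) (total_clear : Int) : Int :=
  match rows with
  | [] => total_clear
  | r :: rest =>
    if r.contains "X" then 2
    else if r.contains "E" then victory_condition_loop rest 0
    else victory_condition_loop rest total_clear

def victory_condition (board : List (List String)) : Int :=
  victory_condition_loop board 1

-- ===== PORT B =====
def victory_condition_alt (board : List (List String)) : Int :=
  if board.any (fun row => row.contains "X") then 2
  else if board.any (fun row => row.contains "E") then 0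
  else 1

-- ===== PRECONDITION & SPEC =====
def Spec_victory_condition (board : List (List String)) (out : Int) : Prop := out = victory_condition_alt board
instance (board : List (List String)) (out : Int) : Decidable (Spec_victory_condition board out) := by unfold Spec_victory_condition; infer_instance

-- ===== CLAIM (what is proved, stated in full; the proofs are below) =====
def Claim_equal_victory_condition : Prop := ∀ (board : List (List String)), Dom_victory_condition board → Spec_victory_condition board (victory_condition board)

-- ===== LEMMAS AND PROOFS =====
lemma victory_condition_loop_eq (rows : List (List String)) (tc : Int) :
    victory_condition_loop rows tc =
      (if rows.any (fun row => row.contains "X") then 2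
       else if rows.any (fun row => row.contains "E") then 0 else tc) := by
  induction rows generalizing tc with
  | nil => simp [victory_condition_loop]
  | cons r rest ih =>
    simp only [victory_condition_loop, List.any_cons, Bool.or_eq_true,
      List.contains_eq_mem, decide_eq_true_eq]
    by_cases hx : "X" ∈ r
    · simp [hx]
    · by_cases he : "E" ∈ r
      · simp [hx, he, ih, List.contains_eq_mem]
      · simp [hx, he, ih, List.contains_eq_mem]

-- ===== VERDICT (by name: the statement is the Claim_ definition above) =====
theorem victory_condition_spec : Claim_equal_victory_condition := by
  intro board _
  unfold Spec_victory_condition victory_condition victory_condition_alt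
  rw [victory_condition_loop_eq]
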